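-- pv_equiv track=rewrite | github.com/beyoglubora/Squad | groups/views.py | check_enroll
-- ===== SOURCE A (Python) =====
-- def check_enroll(skill_set, description):
--     if len(description) == 0 or len(description) > 100:
--         return False
--     skills = skill_set.split(';')
--     if skills == ['']:
--         return False
--     for skill in skills:
--         if not skill or len(skill) > 20 or ";" in skill:
--             return False
--     return True
-- ===== SOURCE B (Python) =====
-- def check_enroll(skill_set, description):
--     # B: single streaming pass over skill_set with a run-length counter;
--     # no intermediate list of segments is built.
--     if not (1 <= len(description) <= 100):
--         return False
--     cnt = 0
--     for ch in skill_set: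
--         if ch == ';':
--             if cnt == 0:
--                 return False
--             cnt = 0
--         else:
--             cnt += 1
--             if cnt > 20:
--                 return False
--     return cnt >= 1
-- ===== Notes on version B (the rewrite author's own statement) =====
-- stated objective: alternative
-- what changed: Replaced split(';') plus a per-segment loop (which materialises the list of segments) by a single streaming pass over skill_set that maintains a run-length counter for the current segment, rejecting as soon as a segment is empty or exceeds 20 characters.
import Mathlib
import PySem

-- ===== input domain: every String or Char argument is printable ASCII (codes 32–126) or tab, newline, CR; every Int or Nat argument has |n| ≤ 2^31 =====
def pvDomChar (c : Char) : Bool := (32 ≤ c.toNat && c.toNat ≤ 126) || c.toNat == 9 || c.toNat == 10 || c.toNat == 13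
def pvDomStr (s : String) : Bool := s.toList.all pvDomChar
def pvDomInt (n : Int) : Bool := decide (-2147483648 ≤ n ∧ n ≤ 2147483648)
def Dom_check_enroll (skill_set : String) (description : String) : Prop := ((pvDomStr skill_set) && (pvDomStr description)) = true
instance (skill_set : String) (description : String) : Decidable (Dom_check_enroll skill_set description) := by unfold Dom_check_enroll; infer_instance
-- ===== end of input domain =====

-- B replaces split-then-check-each-segment by one streaming pass with a run-length
-- counter (alternative decomposition; same return value, same asymptotic cost).

-- ===== PORT A =====
-- for skill in skills: if not skill or len(skill) > 20 or ";" in skill: return False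
def checkEnrollLoopA : List String → Bool
  | [] => true
  | skill :: rest =>
    if PySem.Str.len skill = 0 || PySem.Str.len skill > 20 || PySem.Str.isIn ";" skill then
      false
    else checkEnrollLoopA rest

def check_enroll (skill_set : String) (description : String) : Bool :=
  if PySem.Str.len description = 0 || PySem.Str.len description > 100 then
    false
  else
    -- skill_set.split(';'): sep is the nonempty literal ";", so split? is always `some`
    let skills := (PySem.Str.split? skill_set ";").getD []
    if skills = [""] then false
    else checkEnrollLoopA skills

-- ===== PORT B =====
-- the for-ch loop of Source B: state = current segment's run length; none = early `return False`
def checkEnrollCountB : List Char → Nat → Option Nat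
  | [], cnt => some cnt
  | ch :: rest, cnt =>
    if ch = ';' then
      if cnt = 0 then none else checkEnrollCountB rest 0
    else
      if cnt + 1 > 20 then none else checkEnrollCountB rest (cnt + 1)

def check_enroll_alt (skill_set : String) (description : String) : Bool :=
  if !(1 ≤ PySem.Str.len description && PySem.Str.len description ≤ 100) then
    false
  else
    match checkEnrollCountB skill_set.toList 0 with
    | none => false
    | some cnt => decide (1 ≤ cnt)

-- ===== PRECONDITION & SPEC =====
def Spec_check_enroll (skill_set : String) (description : String) (out : Bool) : Prop := out = check_enroll_alt skill_set description
instance (skill_set : String) (description : String) (out : Bool) : Decidable (Spec_check_enroll skill_set description out) := by unfold Spec_check_enroll; infer_instance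

-- ===== CLAIM (what is proved, stated in full; the proofs are below) =====
def Claim_equal_check_enroll : Prop := ∀ (skill_set : String) (description : String), Dom_check_enroll skill_set description → Spec_check_enroll skill_set description (check_enroll skill_set description)

-- ===== LEMMAS AND PROOFS =====

-- simple structural split on a single character (proof-side model of Python split(';'))
def pvSeg (c : Char) : List Char → List (List Char)
  | [] => [[]]
  | a :: r =>
    if a = c then [] :: pvSeg c r
    else
      match pvSeg c r with
      | [] => [[a]]          -- unreachable: pvSeg is never []
      | s :: ss => (a :: s) :: ss

theorem pvSeg_ne_nil (c : Char) (l : List Char) : pvSeg c l ≠ [] := by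
  cases l with
  | nil => simp [pvSeg]
  | cons a r =>
    simp only [pvSeg]
    split
    · simp
    · split
      · simp
      · simp

-- prepend a prefix to the head segment
def pvMapFst (p : List Char) : List (List Char) → List (List Char)
  | [] => [p]
  | s :: ss => (p ++ s) :: ss

theorem pvSplitOn_go_eq (c : Char) (l : List Char) :
    ∀ fuel, l.length ≤ fuel → ∀ cur acc,
      PySem.Chars.splitOn.go [c] fuel l cur acc
        = acc.reverse ++ pvMapFst cur.reverse (pvSeg c l) := by
  induction l with
  | nil =>
    intro fuel _ cur acc
    cases fuel <;> simp [PySem.Chars.splitOn.go, pvSeg, pvMapFst]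
  | cons a r ih =>
    intro fuel hfuel cur acc
    cases fuel with
    | zero => simp at hfuel
    | succ f =>
      have hr : r.length ≤ f := by simpa using hfuel
      by_cases hac : a = c
      · subst hac
        have hpre : List.isPrefixOf [a] (a :: r) = true := by
          simp [List.isPrefixOf]
        rw [PySem.Chars.splitOn.go, if_pos hpre]
        have hd : List.drop ([a] : List Char).length (a :: r) = r := by simp
        rw [hd, ih f hr [] (cur.reverse :: acc)]
        rcases hseg : pvSeg a r with _ | ⟨s, ss⟩
        · exact absurd hseg (pvSeg_ne_nil a r)
        · simp [pvSeg, pvMapFst, hseg]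
      · have hpre : List.isPrefixOf [c] (a :: r) = false := by
          simp [List.isPrefixOf]
          exact fun h => absurd h.symm hac
        rw [PySem.Chars.splitOn.go, if_neg (by simp [hpre])]
        rw [ih f hr (a :: cur) acc]
        rcases hseg : pvSeg c r with _ | ⟨s, ss⟩
        · exact absurd hseg (pvSeg_ne_nil c r)
        · simp [pvSeg, hac, pvMapFst, hseg]

theorem pvSplitOn_eq (c : Char) (l : List Char) :
    PySem.Chars.splitOn l [c] = pvSeg c l := by
  rw [PySem.Chars.splitOn, pvSplitOn_go_eq c l (l.length + 1) (by omega) [] []]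
  rcases hseg : pvSeg c l with _ | ⟨s, ss⟩
  · exact absurd hseg (pvSeg_ne_nil c l)
  · simp [pvMapFst]

theorem pvSeg_not_mem (c : Char) (l : List Char) :
    ∀ s ∈ pvSeg c l, c ∉ s := by
  induction l with
  | nil => simp [pvSeg]
  | cons a r ih =>
    intro s hs
    simp only [pvSeg] at hs
    by_cases hac : a = c
    · simp [hac] at hs
      rcases hs with h | h
      · simp [h]
      · exact ih s h
    · rw [if_neg hac] at hs
      rcases hseg : pvSeg c r with _ | ⟨t, ts⟩
      · exact absurd hseg (pvSeg_ne_nil c r)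
      · rw [hseg] at hs
        simp at hs
        rcases hs with h | h
        · subst h
          have := ih t (by simp [hseg])
          simp [Ne.symm hac]
          exact this
        · exact ih s (by simp [hseg, h])

theorem pvSeg_eq_singleton_nil_iff (c : Char) (l : List Char) :
    pvSeg c l = [[]] ↔ l = [] := by
  constructor
  · intro h
    cases l with
    | nil => rfl
    | cons a r =>
      exfalso
      simp only [pvSeg] at h
      by_cases hac : a = c
      · rw [if_pos hac] at h
        have := pvSeg_ne_nil c r
        simp at h
        exact this h
      · rw [if_neg hac] at h
        rcases hseg : pvSeg c r with _ | ⟨t, ts⟩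
        · exact absurd hseg (pvSeg_ne_nil c r)
        · rw [hseg] at h; simp at h
  · intro h; subst h; rfl

-- ';' ∈ skill is false on every segment, so A's loop tests only the length bounds
theorem checkEnrollLoopA_eq_all (segs : List (List Char)) (hns : ∀ s ∈ segs, (';' : Char) ∉ s) :
    checkEnrollLoopA (segs.map String.ofList)
      = segs.all (fun s => decide (1 ≤ s.length ∧ s.length ≤ 20)) := by
  induction segs with
  | nil => rfl
  | cons s ss ih =>
    have hno : (';' : Char) ∉ s := hns s (by simp)
    have hIn : PySem.Str.isIn ";" (String.ofList s) = false := by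
      rw [PySem.Str.isIn_eq]
      simp only [String.toList_ofList]
      rw [PySem.Chars.isIn_eq_false_iff]
      intro hinf
      exact hno (hinf.subset (List.mem_singleton_self ';'))
    simp only [List.map_cons, checkEnrollLoopA, hIn, List.all_cons]
    rw [ih (fun t ht => hns t (by simp [ht]))]
    simp only [PySem.Str.len, String.toList_ofList, Bool.or_false]
    by_cases hok : 1 ≤ s.length ∧ s.length ≤ 20
    · have hcond : ((s.length : Int) = 0 || (s.length : Int) > 20) = false := by
        simp only [Bool.or_eq_false_iff, decide_eq_false_iff_not]
        omega
      have hdec : decide (1 ≤ s.length ∧ s.length ≤ 20) = true := by simp [hok]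
      rw [hcond, hdec]
      simp
    · have hcond : ((s.length : Int) = 0 || (s.length : Int) > 20) = true := by
        simp only [Bool.or_eq_true, decide_eq_true_eq]
        omega
      have hdec : decide (1 ≤ s.length ∧ s.length ≤ 20) = false := by
        simp only [decide_eq_false_iff_not]
        omega
      rw [hcond, hdec]
      simp

-- the streaming counter agrees with the head-adjusted all-segments check
theorem checkEnrollCountB_eq (l : List Char) :
    ∀ cnt : Nat, cnt ≤ 20 →
      (match checkEnrollCountB l cnt with
        | none => false
        | some r => decide (1 ≤ r))
      = (match pvSeg ';' l with
        | [] => true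
        | s :: ss =>
          decide (1 ≤ cnt + s.length ∧ cnt + s.length ≤ 20)
            && ss.all (fun t => decide (1 ≤ t.length ∧ t.length ≤ 20))) := by
  induction l with
  | nil =>
    intro cnt hc
    simp only [checkEnrollCountB, pvSeg, List.all_nil, Bool.and_true, List.length_nil,
      Nat.add_zero]
    have harith : (1 ≤ cnt ∧ cnt ≤ 20) ↔ (1 ≤ cnt) := by omega
    rw [decide_eq_decide.mpr harith]
  | cons a r ih =>
    intro cnt hc
    by_cases hac : a = ';'
    · subst hac
      rw [show checkEnrollCountB (';' :: r) cnt
            = if cnt = 0 then none else checkEnrollCountB r 0 from by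
          simp [checkEnrollCountB]]
      rw [show pvSeg ';' (';' :: r) = [] :: pvSeg ';' r from by simp [pvSeg]]
      by_cases h0 : cnt = 0
      · subst h0; simp
      · rw [if_neg h0, ih 0 (by omega)]
        rcases hseg : pvSeg ';' r with _ | ⟨s, ss⟩
        · exact absurd hseg (pvSeg_ne_nil ';' r)
        · have hdec : 1 ≤ cnt ∧ cnt ≤ 20 := by omega
          simp [hdec]
    · rcases hseg : pvSeg ';' r with _ | ⟨s, ss⟩
      · exact absurd hseg (pvSeg_ne_nil ';' r)
      · rw [show checkEnrollCountB (a :: r) cnt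
              = if cnt + 1 > 20 then none else checkEnrollCountB r (cnt + 1) from by
            simp [checkEnrollCountB, hac]]
        rw [show pvSeg ';' (a :: r) = (a :: s) :: ss from by simp [pvSeg, hac, hseg]]
        by_cases hbig : cnt + 1 > 20
        · rw [if_pos hbig]
          have hdec : decide (1 ≤ cnt + (a :: s).length ∧ cnt + (a :: s).length ≤ 20) = false := by
            simp only [decide_eq_false_iff_not, List.length_cons]
            omega
          simp only [hdec, Bool.false_and]
        · rw [if_neg hbig, ih (cnt + 1) (by omega), hseg]
          simp only [List.length_cons]
          have harith : (1 ≤ cnt + 1 + s.length ∧ cnt + 1 + s.length ≤ 20)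
              ↔ (1 ≤ cnt + (s.length + 1) ∧ cnt + (s.length + 1) ≤ 20) := by omega
          rw [decide_eq_decide.mpr harith]

-- main equivalence on the skill_set side (description already admitted)
theorem pv_skill_side (skill_set : String) :
    (if (PySem.Str.split? skill_set ";").getD [] = [""] then false
     else checkEnrollLoopA ((PySem.Str.split? skill_set ";").getD []))
    = (match checkEnrollCountB skill_set.toList 0 with
       | none => false
       | some cnt => decide (1 ≤ cnt)) := by
  have hsplit : PySem.Str.split? skill_set ";"
      = some ((pvSeg ';' skill_set.toList).map String.ofList) := by
    rw [PySem.Str.split?]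
    have h1 : PySem.Chars.split? skill_set.toList ";".toList
        = some (PySem.Chars.splitOn skill_set.toList [';']) := by
      simp [PySem.Chars.split?]
    rw [h1, pvSplitOn_eq]
    rfl
  rw [checkEnrollCountB_eq skill_set.toList 0 (by omega)]
  simp only [hsplit, Option.getD_some]
  by_cases hempty : skill_set.toList = []
  · rw [hempty]
    decide
  · have hne : (pvSeg ';' skill_set.toList).map String.ofList ≠ [""] := by
      intro h
      have h2 : pvSeg ';' skill_set.toList = [[]] := by
        have h3 := congrArg (List.map String.toList) h
        simpa [List.map_map, Function.comp, String.toList_ofList] using h3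
      exact hempty ((pvSeg_eq_singleton_nil_iff ';' skill_set.toList).mp h2)
    rw [if_neg hne, checkEnrollLoopA_eq_all _ (pvSeg_not_mem ';' skill_set.toList)]
    rcases hseg : pvSeg ';' skill_set.toList with _ | ⟨s, ss⟩
    · exact absurd hseg (pvSeg_ne_nil ';' skill_set.toList)
    · simp

-- ===== VERDICT (by name: the statement is the Claim_ definition above) =====
theorem check_enroll_spec : Claim_equal_check_enroll := by
  intro skill_set description _
  unfold Spec_check_enroll check_enroll check_enroll_alt
  by_cases hd : 1 ≤ description.toList.length ∧ description.toList.length ≤ 100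
  · have h1 : (PySem.Str.len description = 0 || PySem.Str.len description > 100) = false := by
      simp only [PySem.Str.len, Bool.or_eq_false_iff, decide_eq_false_iff_not]
      omega
    have h2 : (!(1 ≤ PySem.Str.len description && PySem.Str.len description ≤ 100)) = false := by
      simp only [PySem.Str.len, Bool.not_eq_false', Bool.and_eq_true, decide_eq_true_eq]
      omega
    simp only [h1, h2, Bool.false_eq_true, if_false]
    exact pv_skill_side skill_set
  · have h1 : (PySem.Str.len description = 0 || PySem.Str.len description > 100) = true := by
      simp only [PySem.Str.len, Bool.or_eq_true, decide_eq_true_eq]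
      omega
    have h2 : (!(1 ≤ PySem.Str.len description && PySem.Str.len description ≤ 100)) = true := by
      simp only [PySem.Str.len, Bool.not_eq_true', Bool.and_eq_false_iff, decide_eq_false_iff_not]
      omega
    simp only [h1, h2, if_true]
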